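-- pv_equiv track=rewrite | github.com/CyberOoHim/taigi_voice_datasets_packager | .agent/skills/media-fetcher/src/media_fetcher/patch_metadata.py | count_csv_segments
-- ===== SOURCE A (Python) =====
-- def count_csv_segments(content: str) -> int:
--     lines = content.strip().split('\n')
--     # If there is no 'Index,' header in the content, count all non-empty lines.
--     # Otherwise, count lines after the 'Index,' header.
--     if not any(line.startswith('Index,') for line in lines):
--         return sum(1 for line in lines if line.strip())
--
--     count = 0
--     started = False
--     for line in lines:
--         if started:
--             if line.strip():
--                 count += 1
--         elif line.startswith('Index,'):
--             started = True
--     return count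
-- ===== SOURCE B (Python) =====
-- def count_csv_segments(content: str) -> int:
--     # Single backwards pass: walking from the last line to the first, keep
--     # all_cnt = non-empty lines strictly below the current position, and
--     # after = all_cnt snapshot taken at the topmost header seen so far.
--     all_cnt = 0
--     after = None
--     for line in reversed(content.strip().split('\n')):
--         if line.startswith('Index,'):
--             after = all_cnt
--         if line.strip():
--             all_cnt += 1
--     return all_cnt if after is None else after
-- ===== Notes on version B (the rewrite author's own statement) =====
-- stated objective: alternative
-- what changed: Replaced A's any() pre-scan plus forward stateful started-flag loop by a single backwards pass over the lines keeping two accumulators (non-empty-lines-below count, and a snapshot of it taken at the topmost header), so the header count needs no second pass and no flag.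
import Mathlib
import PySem

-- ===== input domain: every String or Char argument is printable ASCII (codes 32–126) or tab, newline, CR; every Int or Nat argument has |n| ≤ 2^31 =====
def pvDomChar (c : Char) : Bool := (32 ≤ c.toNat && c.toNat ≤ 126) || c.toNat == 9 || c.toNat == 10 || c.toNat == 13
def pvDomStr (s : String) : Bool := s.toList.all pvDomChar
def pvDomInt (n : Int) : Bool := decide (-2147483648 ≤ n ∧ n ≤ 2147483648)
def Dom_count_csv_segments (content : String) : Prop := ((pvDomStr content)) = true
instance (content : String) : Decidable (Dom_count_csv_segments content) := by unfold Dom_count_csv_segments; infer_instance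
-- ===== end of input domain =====

-- B replaces A's any() pre-scan and forward started-flag loop by ONE backwards pass with two
-- accumulators (non-empty-below count, and its snapshot at the topmost header) — alternative decomposition.

-- ===== PORT A =====
-- content.strip().split('\n'): sep is the non-empty literal '\n', so Python's split always returns; split? is some here and getD is never taken.
def count_csv_segments (content : String) : Int :=
  let lines := (PySem.Str.split? (PySem.Str.strip content) "\n").getD []
  if !(lines.any (fun line => PySem.Str.startswith line "Index,")) then
    lines.foldl (fun acc line => if PySem.Str.strip line ≠ "" then acc + 1 else acc) 0
  else
    (lines.foldl (fun (st : Int × Bool) line =>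
        if st.2 then (if PySem.Str.strip line ≠ "" then (st.1 + 1, st.2) else st)
        else if PySem.Str.startswith line "Index," then (st.1, true) else st)
      ((0 : Int), false)).1

-- ===== PORT B =====
-- reversed(lines) → lines.reverse; the loop state is (all_cnt, after) with after : Option Int.
def count_csv_segments_alt (content : String) : Int :=
  let lines := (PySem.Str.split? (PySem.Str.strip content) "\n").getD []
  let st := lines.reverse.foldl (fun (st : Int × Option Int) line =>
      let after := if PySem.Str.startswith line "Index," then some st.1 else st.2
      let allc := if PySem.Str.strip line ≠ "" then st.1 + 1 else st.1
      (allc, after)) ((0 : Int), none)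
  match st.2 with
  | none => st.1
  | some c => c

-- ===== PRECONDITION & SPEC =====
def Spec_count_csv_segments (content : String) (out : Int) : Prop := out = count_csv_segments_alt content
instance (content : String) (out : Int) : Decidable (Spec_count_csv_segments content out) := by unfold Spec_count_csv_segments; infer_instance

-- ===== CLAIM (what is proved, stated in full; the proofs are below) =====
def Claim_equal_count_csv_segments : Prop := ∀ (content : String), Dom_count_csv_segments content → Spec_count_csv_segments content (count_csv_segments content)

-- ===== LEMMAS AND PROOFS =====

def pvCnt (ls : List String) : Int :=
  ((ls.filter (fun line => PySem.Str.strip line ≠ "")).length : Int)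

def pvStep (st : Int × Bool) (line : String) : Int × Bool :=
  if st.2 then (if PySem.Str.strip line ≠ "" then (st.1 + 1, st.2) else st)
  else if PySem.Str.startswith line "Index," then (st.1, true) else st

def pvBStep (st : Int × Option Int) (line : String) : Int × Option Int :=
  let after := if PySem.Str.startswith line "Index," then some st.1 else st.2
  let allc := if PySem.Str.strip line ≠ "" then st.1 + 1 else st.1
  (allc, after)

lemma pvCnt_cons (l : String) (t : List String) :
    pvCnt (l :: t) = (if PySem.Str.strip l ≠ "" then 1 else 0) + pvCnt t := by
  by_cases h : PySem.Str.strip l ≠ "" <;>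
    simp [pvCnt, List.filter_cons, h] <;> push_cast <;> ring

-- the plain counting fold of A's no-header branch computes pvCnt
lemma pvFold_cnt (xs : List String) (c : Int) :
    xs.foldl (fun acc line => if PySem.Str.strip line ≠ "" then acc + 1 else acc) c
      = c + pvCnt xs := by
  induction xs generalizing c with
  | nil => simp [pvCnt]
  | cons a b ih =>
    rw [List.foldl_cons, ih, pvCnt_cons]
    by_cases h : PySem.Str.strip a ≠ "" <;> simp [h] <;> ring

-- A's loop, once started, counts the non-empty lines
lemma pvStep_started (ls : List String) (c : Int) :
    ls.foldl pvStep (c, true) = (c + pvCnt ls, true) := by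
  induction ls generalizing c with
  | nil => simp [pvCnt]
  | cons l t ih =>
    rw [List.foldl_cons]
    by_cases h : PySem.Str.strip l ≠ ""
    · rw [show pvStep (c, true) l = (c + 1, true) by simp [pvStep, h],
        ih, pvCnt_cons, if_pos h]
      rw [Prod.mk.injEq]
      exact ⟨by ring, rfl⟩
    · rw [show pvStep (c, true) l = (c, true) by simp [pvStep, h],
        ih, pvCnt_cons, if_neg h]
      rw [Prod.mk.injEq]
      exact ⟨by ring, rfl⟩

lemma pvStep_not_started_pos (c : Int) (l : String)
    (h : PySem.Str.startswith l "Index," = true) : pvStep (c, false) l = (c, true) := by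
  simp only [pvStep, Bool.false_eq_true, if_false, h, if_true]

lemma pvStep_not_started_neg (c : Int) (l : String)
    (h : PySem.Str.startswith l "Index," = false) : pvStep (c, false) l = (c, false) := by
  simp only [pvStep, Bool.false_eq_true, if_false, h]

-- A's branch structure equals findIdx?-then-drop counting
lemma pvCore (ls : List String) :
    (if !(ls.any (fun line => PySem.Str.startswith line "Index,")) then
       ls.foldl (fun acc line => if PySem.Str.strip line ≠ "" then acc + 1 else acc) 0
     else (ls.foldl pvStep ((0 : Int), false)).1)
    = (ls.findIdx? (fun line => PySem.Str.startswith line "Index,")).elim (pvCnt ls)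
        (fun k => pvCnt (ls.drop (k + 1))) := by
  induction ls with
  | nil => simp [pvCnt]
  | cons l t ih =>
    rw [List.any_cons, List.findIdx?_cons]
    cases hl : PySem.Str.startswith l "Index," with
    | true =>
      rw [if_pos rfl, Bool.true_or, Bool.not_true, if_neg (by simp),
        List.foldl_cons, pvStep_not_started_pos _ _ hl, pvStep_started]
      simp
    | false =>
      simp only [Bool.false_eq_true, if_false, Bool.false_or]
      cases ht : t.any (fun line => PySem.Str.startswith line "Index,") with
      | false =>
        have hidx : t.findIdx? (fun line => PySem.Str.startswith line "Index,") = none := by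
          rw [List.findIdx?_eq_none_iff]
          intro x hx
          have hx' := List.any_eq_false.mp (by simpa using ht) x hx
          simpa using hx'
        rw [hidx, Bool.not_false, if_pos rfl, pvFold_cnt]
        simp
      | true =>
        obtain ⟨k, hk⟩ : ∃ k, t.findIdx? (fun line => PySem.Str.startswith line "Index,") = some k := by
          rcases h : t.findIdx? (fun line => PySem.Str.startswith line "Index,") with _ | k
          · rw [List.findIdx?_eq_none_iff] at h
            rcases List.any_eq_true.mp ht with ⟨x, hx, hpx⟩
            exact absurd (h x hx) (by simpa using hpx)
          · exact ⟨k, rfl⟩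
        rw [ht, Bool.not_true, if_neg (by simp), hk, Option.elim_some] at ih
        rw [hk, Bool.not_true, if_neg (by simp), List.foldl_cons,
          pvStep_not_started_neg _ _ hl, ih]
        simp

-- B's backwards pass computes the total non-empty count and, as snd, the same
-- count-after-topmost-header that findIdx?-then-drop describes
lemma pvB (ls : List String) :
    ls.reverse.foldl pvBStep ((0 : Int), none)
      = (pvCnt ls, (ls.findIdx? (fun line => PySem.Str.startswith line "Index,")).map
          (fun k => pvCnt (ls.drop (k + 1)))) := by
  induction ls with
  | nil => simp [pvCnt]
  | cons l t ih =>
    rw [List.reverse_cons, List.foldl_append, ih, List.foldl_cons, List.foldl_nil,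
      List.findIdx?_cons]
    cases hl : PySem.Str.startswith l "Index," with
    | true =>
      rw [if_pos rfl]
      simp only [pvBStep, hl]
      rw [if_pos trivial, Option.map_some, Prod.mk.injEq]
      refine ⟨?_, ?_⟩
      · rw [pvCnt_cons]
        by_cases h : PySem.Str.strip l ≠ ""
        · rw [if_pos h, if_pos h]; ring
        · rw [if_neg h, if_neg h]; ring
      · simp
    | false =>
      rw [if_neg (by simp [hl])]
      simp only [pvBStep, hl, Bool.false_eq_true, if_false, Option.map_map]
      rw [Prod.mk.injEq]
      refine ⟨?_, ?_⟩
      · rw [pvCnt_cons]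
        by_cases h : PySem.Str.strip l ≠ ""
        · rw [if_pos h, if_pos h]; ring
        · rw [if_neg h, if_neg h]; ring
      · cases t.findIdx? (fun line => PySem.Str.startswith line "Index,") <;> simp

-- ===== VERDICT (by name: the statement is the Claim_ definition above) =====
theorem count_csv_segments_spec : Claim_equal_count_csv_segments := by
  intro content _
  unfold Spec_count_csv_segments count_csv_segments count_csv_segments_alt
  dsimp only
  generalize (PySem.Str.split? (PySem.Str.strip content) "\n").getD [] = ls
  rw [show (fun (st : Int × Bool) line =>
      if st.2 then (if PySem.Str.strip line ≠ "" then (st.1 + 1, st.2) else st)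
      else if PySem.Str.startswith line "Index," then (st.1, true) else st) = pvStep from rfl]
  rw [show (fun (st : Int × Option Int) line =>
      let after := if PySem.Str.startswith line "Index," then some st.1 else st.2
      let allc := if PySem.Str.strip line ≠ "" then st.1 + 1 else st.1
      (allc, after)) = pvBStep from rfl]
  rw [pvCore, pvB]
  cases hfk : ls.findIdx? (fun line => PySem.Str.startswith line "Index,") <;> simp
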